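-- pv_equiv track=rewrite | github.com/parzivval/Web-Dev | Lab 7/Task 1/codingbat/list-2.py | sum67
-- ===== SOURCE A (Python) =====
-- def sum67(nums):
--   for i in range(0, len(nums)):
--     if nums[i] == 6:
--       nums[i] = 0
--       for j in range(i+1, len(nums)):
--         temp = nums[j]
--         nums[j] = 0
--         if temp == 7:
--           i = j + 1
--           break
--   return sum(nums)
-- ===== SOURCE B (Python) =====
-- def sum67(nums):
--     total = 0
--     skipping = False
--     for x in nums:
--         if skipping:
--             if x == 7:
--                 skipping = False
--         elif x == 6:
--             skipping = True
--         else: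
--             total += x
--     return total
-- ===== Notes on version B (the rewrite author's own statement) =====
-- stated objective: simpler
-- what changed: Replaced the index-based loop that destructively zeroes the 6..7 regions of the list (and then sums it) with a single non-mutating pass carrying a skip flag and a running total.
import Mathlib
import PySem

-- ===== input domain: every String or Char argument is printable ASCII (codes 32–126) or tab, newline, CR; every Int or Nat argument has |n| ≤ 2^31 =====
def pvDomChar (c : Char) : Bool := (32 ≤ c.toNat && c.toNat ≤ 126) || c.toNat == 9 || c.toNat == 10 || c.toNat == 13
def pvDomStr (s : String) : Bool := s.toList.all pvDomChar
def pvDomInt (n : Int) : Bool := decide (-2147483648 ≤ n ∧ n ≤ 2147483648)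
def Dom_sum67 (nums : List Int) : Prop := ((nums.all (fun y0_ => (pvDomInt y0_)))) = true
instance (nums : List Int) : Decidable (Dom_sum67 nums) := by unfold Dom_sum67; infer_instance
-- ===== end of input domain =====

-- B replaces A's destructive zeroing of each 6..7 region (followed by summing the list)
-- with one non-mutating pass carrying a skip flag; equal return value, but note the
-- Python A mutates its argument in place while B does not — only the return value is claimed.

-- ===== PORT A =====
-- inner loop: 'for j in range(i+1, len(nums)): temp = nums[j]; nums[j] = 0; if temp == 7: break'
-- (ported by structural recursion on the range's exact iteration count, fuel = len(nums) - (i+1))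
def sum67Inner (fuel : Nat) (l : List Int) (j : Nat) : List Int :=
  match fuel with
  | 0 => l
  | f + 1 =>
    let temp := l.getD j 0
    let l' := l.set j 0
    if temp == 7 then l' else sum67Inner f l' (j + 1)

-- outer loop: 'for i in range(0, len(nums)): if nums[i] == 6: nums[i] = 0; <inner>'
-- (fuel = the range's iteration count len(nums) - i; every nums[i] access is in range)
def sum67Go (fuel : Nat) (l : List Int) (i : Nat) : List Int :=
  match fuel with
  | 0 => l
  | f + 1 =>
    if l.getD i 0 == 6 then
      sum67Go f (sum67Inner (l.length - (i + 1)) (l.set i 0) (i + 1)) (i + 1)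
    else sum67Go f l (i + 1)

def sum67 (nums : List Int) : Int := (sum67Go nums.length nums 0).sum

-- ===== PORT B =====
def sum67AltGo : List Int → Bool → Int → Int
  | [], _, total => total
  | x :: xs, skipping, total =>
    if skipping then sum67AltGo xs (if x == 7 then false else true) total
    else if x == 6 then sum67AltGo xs true total
    else sum67AltGo xs skipping (total + x)

def sum67_alt (nums : List Int) : Int := sum67AltGo nums false 0

-- ===== PRECONDITION & SPEC =====
def Spec_sum67 (nums : List Int) (out : Int) : Prop := out = sum67_alt nums
instance (nums : List Int) (out : Int) : Decidable (Spec_sum67 nums out) := by unfold Spec_sum67; infer_instance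

-- ===== CLAIM (what is proved, stated in full; the proofs are below) =====
def Claim_equal_sum67 : Prop := ∀ (nums : List Int), Dom_sum67 nums → Spec_sum67 nums (sum67 nums)

-- ===== LEMMAS AND PROOFS =====

-- structural picture of A's mutation: zI zeroes a prefix up to and including the first 7;
-- gA/gI are the final list produced by the outer loop, structurally.
def zI : List Int → List Int
  | [] => []
  | x :: xs => if x == 7 then 0 :: xs else 0 :: zI xs

mutual
def gA : List Int → List Int
  | [] => []
  | x :: xs => if x == 6 then 0 :: gI xs else x :: gA xs
def gI : List Int → List Int
  | [] => []
  | x :: xs => if x == 7 then 0 :: gA xs else 0 :: gI xs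
end

theorem zI_length (xs : List Int) : (zI xs).length = xs.length := by
  induction xs with
  | nil => rfl
  | cons x xs ih => by_cases h : x = 7 <;> simp [zI, h, ih]

theorem sum67Inner_spec (xs : List Int) : ∀ pre : List Int,
    sum67Inner xs.length (pre ++ xs) pre.length = pre ++ zI xs := by
  induction xs with
  | nil => intro pre; simp [sum67Inner, zI]
  | cons x xs ih =>
    intro pre
    have hget : (pre ++ x :: xs).getD pre.length 0 = x := by
      simp [List.getD]
    have hset : (pre ++ x :: xs).set pre.length 0 = pre ++ 0 :: xs := by
      rw [List.set_append_right _ _ (le_refl _)]; simp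
    simp only [List.length_cons, sum67Inner, hget, hset]
    by_cases h7 : x = 7
    · simp [h7, zI]
    · have := ih (pre ++ [0])
      rw [if_neg (by simp [h7])]
      rw [show pre.length + 1 = (pre ++ [0]).length by simp,
          show pre ++ (0 : Int) :: xs = (pre ++ [0]) ++ xs by simp, this]
      simp [zI, h7]

theorem gA_zI (xs : List Int) : gA (zI xs) = gI xs := by
  induction xs with
  | nil => simp [zI, gA, gI]
  | cons x xs ih =>
    by_cases h7 : x = 7
    · simp [zI, gA, gI, h7]
    · simp [zI, gA, gI, h7, ih]

theorem sum67Go_spec_aux (n : Nat) : ∀ (xs : List Int), xs.length ≤ n → ∀ pre : List Int,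
    sum67Go xs.length (pre ++ xs) pre.length = pre ++ gA xs := by
  induction n with
  | zero =>
    intro xs hle pre
    have : xs = [] := List.eq_nil_of_length_eq_zero (by omega)
    subst this
    simp [sum67Go, gA]
  | succ n ih =>
    intro xs hle pre
    match xs with
    | [] => simp [sum67Go, gA]
    | x :: xs =>
      simp only [List.length_cons] at hle
      have hget : (pre ++ x :: xs).getD pre.length 0 = x := by
        simp [List.getD]
      have hset : (pre ++ x :: xs).set pre.length 0 = pre ++ 0 :: xs := by
        rw [List.set_append_right _ _ (le_refl _)]; simp
      simp only [List.length_cons, sum67Go, hget]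
      by_cases h6 : x = 6
      · subst h6
        rw [if_pos (by simp), hset,
            show (pre ++ (6 : Int) :: xs).length - (pre.length + 1) = xs.length by simp; omega]
        have hin : sum67Inner xs.length (pre ++ 0 :: xs) (pre.length + 1)
            = (pre ++ [0]) ++ zI xs := by
          rw [show pre.length + 1 = (pre ++ [0]).length by simp,
              show pre ++ (0 : Int) :: xs = (pre ++ [0]) ++ xs by simp]
          exact sum67Inner_spec xs (pre ++ [0])
        rw [hin,
            show xs.length = (zI xs).length from (zI_length xs).symm,
            show pre.length + 1 = (pre ++ [0]).length by simp,
            ih (zI xs) (by rw [zI_length]; omega) (pre ++ [0])]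
        simp [gA, gA_zI]
      · rw [if_neg (by simp [h6])]
        rw [show pre.length + 1 = (pre ++ [x]).length by simp,
            show pre ++ x :: xs = (pre ++ [x]) ++ xs by simp,
            ih xs (by omega) (pre ++ [x])]
        simp [gA, h6]

theorem sum67Go_spec (xs : List Int) (pre : List Int) :
    sum67Go xs.length (pre ++ xs) pre.length = pre ++ gA xs :=
  sum67Go_spec_aux xs.length xs (le_refl _) pre

theorem altGo_acc (xs : List Int) : ∀ s t, sum67AltGo xs s t = t + sum67AltGo xs s 0 := by
  induction xs with
  | nil => intro s t; simp [sum67AltGo]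
  | cons x xs ih =>
    intro s t
    cases s <;> by_cases h6 : x = 6 <;> by_cases h7 : x = 7 <;> simp [sum67AltGo, h6, h7]
    all_goals first
      | exact ih _ _
      | (conv_lhs => rw [ih]
         conv_rhs => rw [ih]
         ring)

mutual
theorem gA_sum (xs : List Int) : (gA xs).sum = sum67AltGo xs false 0 := by
  match xs with
  | [] => simp [gA, sum67AltGo]
  | x :: xs =>
    by_cases h6 : x = 6
    · simp [gA, h6, sum67AltGo, gI_sum xs]
    · have e : sum67AltGo (x :: xs) false 0 = sum67AltGo xs false x := by
        simp [sum67AltGo, h6]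
      rw [e, altGo_acc xs false x, ← gA_sum xs]
      simp [gA, h6]
theorem gI_sum (xs : List Int) : (gI xs).sum = sum67AltGo xs true 0 := by
  match xs with
  | [] => simp [gI, sum67AltGo]
  | x :: xs =>
    by_cases h7 : x = 7
    · simp [gI, h7, sum67AltGo, gA_sum xs]
    · simp [gI, h7, sum67AltGo, gI_sum xs]
end

-- ===== VERDICT (by name: the statement is the Claim_ definition above) =====
theorem sum67_spec : Claim_equal_sum67 := by
  intro nums _
  unfold Spec_sum67 sum67 sum67_alt
  have h := sum67Go_spec nums []
  simp only [List.nil_append, List.length_nil] at h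
  rw [h, gA_sum]
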